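-- pv_equiv track=rewrite | github.com/christoffersire/nm-ai-2026-ngd | data/audit_outliers.py | centroid_hash
-- ===== SOURCE A (Python) =====
-- HASH_SIZE        = 16      # 16x16 = 256 bits
--
-- def centroid_hash(hashes):
--     """Majority-vote hash: bit i = 1 if more than half of hashes have it set."""
--     n = len(hashes)
--     total_bits = HASH_SIZE * HASH_SIZE
--     counts = [0] * total_bits
--     for h in hashes:
--         for i in range(total_bits):
--             if (h >> (total_bits - 1 - i)) & 1:
--                 counts[i] += 1
--     val = 0
--     for c in counts:
--         val = (val << 1) | (1 if c > n / 2 else 0)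
--     return val
-- ===== SOURCE B (Python) =====
-- HASH_SIZE = 16      # 16x16 = 256 bits
--
-- def centroid_hash(hashes):
--     """Majority-vote hash: bit i = 1 if more than half of hashes have it set."""
--     n = len(hashes)
--     total_bits = HASH_SIZE * HASH_SIZE
--     val = 0
--     for p in range(total_bits - 1, -1, -1):
--         count = sum((h >> p) & 1 for h in hashes)
--         val = (val << 1) | (1 if 2 * count > n else 0)
--     return val
-- ===== Notes on version B (the rewrite author's own statement) =====
-- stated objective: simpler
-- what changed: Drops A's 256-entry counts array and its two phases (count every bit of every hash, then threshold the array): B makes one MSB-to-LSB pass over bit positions, counting the bit across the hashes and folding the majority bit into the result directly.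
import Mathlib
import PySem

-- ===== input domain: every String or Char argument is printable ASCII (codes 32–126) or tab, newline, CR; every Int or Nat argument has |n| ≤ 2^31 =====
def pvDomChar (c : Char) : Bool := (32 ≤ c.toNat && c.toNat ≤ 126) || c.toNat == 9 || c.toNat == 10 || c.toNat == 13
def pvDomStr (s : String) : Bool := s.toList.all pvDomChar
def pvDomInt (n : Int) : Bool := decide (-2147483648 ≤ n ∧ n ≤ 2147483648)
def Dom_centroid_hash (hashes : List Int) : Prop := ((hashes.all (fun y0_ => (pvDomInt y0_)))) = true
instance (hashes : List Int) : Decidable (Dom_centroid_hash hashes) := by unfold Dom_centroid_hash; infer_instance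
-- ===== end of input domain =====

-- B drops A's counts array and two phases, folding the majority bit into the result in one MSB-first pass (same cost; simpler).


-- ===== PORT A =====
-- '(h >> k) & 1' (a subexpression of both Pythons; Python's >> on int is Lean's >>> on Int, & is PySem.Int.band)
def pyBit (h : Int) (k : Nat) : Int := PySem.Int.band (h >>> k) 1

-- 'c > n / 2' (true division) ported as 2*c > n: exact, since both sides are ints and the float n/2 is
-- exact for n = len(hashes).  'counts[i] += 1' ported with List.set/List.getD: i < 256 = len(counts) always.
-- '(val << 1) | bit' is PySem.Int.bor (val <<< 1) bit.
def centroid_hash (hashes : List Int) : Int :=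
  let n : Int := hashes.length
  let totalBits : Nat := 16 * 16
  let counts : List Int := List.replicate totalBits 0
  let counts := hashes.foldl (fun cs h =>
    (List.range totalBits).foldl (fun cs i =>
      if pyBit h (totalBits - 1 - i) = 1 then cs.set i (cs.getD i 0 + 1) else cs) cs) counts
  counts.foldl (fun val c => PySem.Int.bor (val <<< 1) (if 2 * c > n then 1 else 0)) 0

-- ===== PORT B =====
-- range(total_bits-1, -1, -1) = [255, 254, …, 0] ported as (List.range 256).reverse (the same sequence);
-- 'sum((h >> p) & 1 for h in hashes)' ported as a foldl; same exact '2*count > n' for 'count > n/2'.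
def centroid_hash_alt (hashes : List Int) : Int :=
  let n : Int := hashes.length
  let totalBits : Nat := 16 * 16
  ((List.range totalBits).reverse).foldl (fun val p =>
    let count : Int := hashes.foldl (fun s h => s + pyBit h p) 0
    PySem.Int.bor (val <<< 1) (if 2 * count > n then 1 else 0)) 0

-- ===== PRECONDITION & SPEC =====
def Spec_centroid_hash (hashes : List Int) (out : Int) : Prop := out = centroid_hash_alt hashes
instance (hashes : List Int) (out : Int) : Decidable (Spec_centroid_hash hashes out) := by unfold Spec_centroid_hash; infer_instance

-- ===== CLAIM (what is proved, stated in full; the proofs are below) =====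
def Claim_equal_centroid_hash : Prop := ∀ (hashes : List Int), Dom_centroid_hash hashes → Spec_centroid_hash hashes (centroid_hash hashes)

-- ===== LEMMAS AND PROOFS =====

-- count of bit p over the hashes (B's per-position sum)
def pvCnt (hashes : List Int) (p : Nat) : Int := hashes.foldl (fun s h => s + pyBit h p) 0

lemma pvBit01 (h : Int) (k : Nat) : pyBit h k = 0 ∨ pyBit h k = 1 := by
  unfold pyBit
  rw [PySem.Int.band_one]
  have h1 := PySem.Int.mod_nonneg (h >>> k) (b := 2) (by norm_num)
  have h2 := PySem.Int.mod_lt (h >>> k) (b := 2) (by norm_num)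
  omega

lemma pvCnt_cons (h : Int) (t : List Int) (p : Nat) :
    pvCnt (h :: t) p = pyBit h p + pvCnt t p := by
  simp [pvCnt, PySem.List.foldl_add]

lemma pvGetD_set_self (l : List Int) (i : Nat) (x : Int) (h : i < l.length) :
    (l.set i x).getD i 0 = x := by
  simp [List.getD_eq_getElem?_getD, h]

lemma pvGetD_set_ne (l : List Int) (i j : Nat) (x : Int) (h : i ≠ j) :
    (l.set i x).getD j 0 = l.getD j 0 := by
  simp [List.getD_eq_getElem?_getD, h]

-- A's inner loop over range m: adds pyBit h (255-j) at every index j < m, leaves the rest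
lemma pvInner (h : Int) (cs : List Int) (m : Nat) (hm : m ≤ cs.length) :
    ((List.range m).foldl (fun cs i =>
      if pyBit h (256 - 1 - i) = 1 then cs.set i (cs.getD i 0 + 1) else cs) cs).length = cs.length ∧
    ∀ j, ((List.range m).foldl (fun cs i =>
      if pyBit h (256 - 1 - i) = 1 then cs.set i (cs.getD i 0 + 1) else cs) cs).getD j 0 =
      if j < m then cs.getD j 0 + pyBit h (256 - 1 - j) else cs.getD j 0 := by
  induction m with
  | zero => simp
  | succ m ih =>
    obtain ⟨ihlen, ihget⟩ := ih (by omega)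
    rw [List.range_succ, List.foldl_append, List.foldl_cons, List.foldl_nil]
    constructor
    · by_cases hbit : pyBit h (256 - 1 - m) = 1
      · rw [if_pos hbit, List.length_set]; exact ihlen
      · rw [if_neg hbit]; exact ihlen
    · intro j
      by_cases hbit : pyBit h (256 - 1 - m) = 1
      · rw [if_pos hbit]
        by_cases hjm : j = m
        · subst hjm
          rw [pvGetD_set_self _ _ _ (by rw [ihlen]; omega), ihget j,
            if_neg (by omega), if_pos (by omega), hbit]
        · rw [pvGetD_set_ne _ _ _ _ (fun he => hjm he.symm), ihget j]
          by_cases hjlt : j < m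
          · rw [if_pos hjlt, if_pos (by omega)]
          · rw [if_neg hjlt, if_neg (by omega)]
      · rw [if_neg hbit, ihget j]
        by_cases hjm : j = m
        · subst hjm
          rw [if_neg (by omega), if_pos (by omega)]
          have := pvBit01 h (256 - 1 - j)
          omega
        · by_cases hjlt : j < m
          · rw [if_pos hjlt, if_pos (by omega)]
          · rw [if_neg hjlt, if_neg (by omega)]

-- A's counts after the outer loop: index j holds the count of bit 255-j
lemma pvCounts (hashes : List Int) (cs : List Int) (hl : cs.length = 256) :
    (hashes.foldl (fun cs h =>
      (List.range 256).foldl (fun cs i =>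
        if pyBit h (256 - 1 - i) = 1 then cs.set i (cs.getD i 0 + 1) else cs) cs) cs).length = 256 ∧
    ∀ j, j < 256 →
      (hashes.foldl (fun cs h =>
        (List.range 256).foldl (fun cs i =>
          if pyBit h (256 - 1 - i) = 1 then cs.set i (cs.getD i 0 + 1) else cs) cs) cs).getD j 0 =
        cs.getD j 0 + pvCnt hashes (256 - 1 - j) := by
  induction hashes generalizing cs with
  | nil => exact ⟨hl, fun j _ => by simp [pvCnt]⟩
  | cons h t ih =>
    simp only [List.foldl_cons]
    obtain ⟨hl', hg'⟩ := pvInner h cs 256 (by omega)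
    have hl2 : ((List.range 256).foldl (fun cs i =>
        if pyBit h (256 - 1 - i) = 1 then cs.set i (cs.getD i 0 + 1) else cs) cs).length = 256 := by
      rw [hl']; exact hl
    obtain ⟨rl, rg⟩ := ih _ hl2
    refine ⟨rl, fun j hj => ?_⟩
    rw [rg j hj, hg' j, if_pos hj, pvCnt_cons]
    ring

-- [255, …, 0] as a map over [0, …, 255]
lemma pvRevRange : (List.range 256).reverse = (List.range 256).map (fun j => 256 - 1 - j) := by
  rw [List.range_eq_range', List.reverse_range', ← List.range_eq_range']

-- ===== VERDICT (by name: the statement is the Claim_ definition above) =====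
theorem centroid_hash_spec : Claim_equal_centroid_hash := by
  intro hashes _
  unfold Spec_centroid_hash
  simp only [centroid_hash, centroid_hash_alt, show (16 * 16 : Nat) = 256 from rfl]
  obtain ⟨hlen, hget⟩ := pvCounts hashes (List.replicate 256 0) (by rw [List.length_replicate])
  have hmap : (hashes.foldl (fun cs h =>
      (List.range 256).foldl (fun cs i =>
        if pyBit h (256 - 1 - i) = 1 then cs.set i (cs.getD i 0 + 1) else cs) cs)
      (List.replicate 256 0)) = (List.range 256).map (fun j => pvCnt hashes (256 - 1 - j)) := by
    apply List.ext_getElem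
    · rw [hlen, List.length_map, List.length_range]
    · intro j hj hj'
      have hj256 : j < 256 := by rw [hlen] at hj; exact hj
      rw [← List.getD_eq_getElem _ 0 hj, hget j hj256, List.getElem_map, List.getElem_range,
        List.getD_eq_getElem _ 0 (by rw [List.length_replicate]; exact hj256), List.getElem_replicate]
      exact zero_add _
  rw [hmap, List.foldl_map, pvRevRange, List.foldl_map]
  simp only [pvCnt]
  rfl
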